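-- pv_equiv track=rewrite | github.com/tonyeko/TuBes-2-TBFO | cyk.py | removecomment
-- ===== SOURCE A (Python) =====
-- def removecomment(sentence):
--     temp = sentence.split("\n")
--     idxpetik = []
--     for i in range(len(temp)):
--         if "'''" in temp[i]:
--             idxpetik.append(i)
--     i = 0
--     while (i < len(idxpetik)):
--         try:
--             for j in range(idxpetik[i],idxpetik[i+1]+1):
--                 temp[j] = ""
--         except:
--             for j in range(idxpetik[i],len(temp)):
--                 temp[j] = "^%"
--         i += 2
--     return '\n'.join(temp)
-- ===== SOURCE B (Python) =====
-- def removecomment(sentence):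
--     out = []
--     pending = 0  # number of lines in the currently open '''-block (0 = no open block)
--     for line in sentence.split("\n"):
--         if "'''" in line:
--             if pending == 0:
--                 pending = 1
--             else:
--                 out.extend([""] * (pending + 1))
--                 pending = 0
--         else:
--             if pending == 0:
--                 out.append(line)
--             else:
--                 pending += 1
--     if pending != 0:
--         out.extend(["^%"] * pending)
--     return "\n".join(out)
-- ===== Notes on version B (the rewrite author's own statement) =====
-- stated objective: simpler
-- what changed: B replaces A's two-phase scheme (collect all marker-line indices, then pair them up with a try/except while-loop that overwrites slices of the line array in place) by a single forward pass over the lines with a pending-block counter that emits blank lines when a block closes and the unclosed-tail filler lines at the end.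
import Mathlib
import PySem

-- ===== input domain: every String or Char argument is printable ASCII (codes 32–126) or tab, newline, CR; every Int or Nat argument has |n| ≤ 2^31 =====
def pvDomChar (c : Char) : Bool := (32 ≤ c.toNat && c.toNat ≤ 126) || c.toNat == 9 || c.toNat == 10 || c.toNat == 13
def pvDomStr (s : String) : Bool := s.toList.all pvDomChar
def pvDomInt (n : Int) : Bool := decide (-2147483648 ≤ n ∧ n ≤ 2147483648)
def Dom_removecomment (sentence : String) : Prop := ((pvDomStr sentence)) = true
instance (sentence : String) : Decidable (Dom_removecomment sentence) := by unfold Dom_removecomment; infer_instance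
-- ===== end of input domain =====

-- B: one forward pass with a pending-block counter instead of A's index-list + pairing while-loop; same output (objective: simpler).

-- ===== PORT A =====
-- "'''" in line
def pvP (line : String) : Bool := PySem.Str.isIn "'''" line

-- for j in range(a, b): temp[j] = v   (j is always a valid nonnegative index at A's call sites)
def pvFill (temp : List String) (a b : Int) (v : String) : List String :=
  (PySem.List.pyRange a b 1).foldl (fun t j => t.set j.toNat v) temp

-- the while-loop: i += 2 each turn; try reads idxpetik[i+1] (pyGet? none = IndexError -> except branch)
def pvAWhile (idx : List Int) (temp : List String) (i : Nat) : List String :=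
  if h : i < idx.length then
    pvAWhile idx
      (match PySem.List.pyGet? idx ((i : Int) + 1) with
       | some b => pvFill temp idx[i] (b + 1) ""
       | none   => pvFill temp idx[i] ((temp.length : Int)) "^%")
      (i + 2)
  else temp
termination_by idx.length - i
decreasing_by omega

-- sentence.split("\n"): sep is the nonempty "\n", so split? is always `some`
def removecomment (sentence : String) : String :=
  let temp := (PySem.Str.split? sentence "\n").getD []
  let idxpetik := (PySem.List.pyRange 0 (temp.length : Int) 1).foldl
    (fun acc i => if pvP (PySem.List.pyGetD temp i "") then acc ++ [i] else acc) []
  PySem.Str.join "\n" (pvAWhile idxpetik temp 0)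

-- ===== PORT B =====
-- loop body: (out, pending) -> line -> (out, pending)
def pvBStep (st : List String × Int) (line : String) : List String × Int :=
  if pvP line then
    if st.2 == 0 then (st.1, 1)
    else (st.1 ++ List.replicate (st.2 + 1).toNat "", 0)
  else
    if st.2 == 0 then (st.1 ++ [line], st.2)
    else (st.1, st.2 + 1)

def removecomment_alt (sentence : String) : String :=
  let st := ((PySem.Str.split? sentence "\n").getD []).foldl pvBStep ([], 0)
  let out := if st.2 == 0 then st.1 else st.1 ++ List.replicate st.2.toNat "^%"
  PySem.Str.join "\n" out

-- ===== PRECONDITION & SPEC =====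
def Spec_removecomment (sentence : String) (out : String) : Prop := out = removecomment_alt sentence
instance (sentence : String) (out : String) : Decidable (Spec_removecomment sentence out) := by unfold Spec_removecomment; infer_instance

-- ===== CLAIM (what is proved, stated in full; the proofs are below) =====
def Claim_equal_removecomment : Prop := ∀ (sentence : String), Dom_removecomment sentence → Spec_removecomment sentence (removecomment sentence)

-- ===== LEMMAS AND PROOFS =====

-- set all indices a <= i < b to v (proof-layer view of A's fills)
def pvSetAll (temp : List String) (v : String) (a b : Nat) : List String :=
  temp.mapIdx (fun i x => if a ≤ i ∧ i < b then v else x)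

-- A's while-loop seen as recursion on the remaining index list (Int indices)
def pvPairsI : List String → List Int → List String
  | temp, [] => temp
  | temp, [a] => pvFill temp a ((temp.length : Int)) "^%"
  | temp, a :: b :: r => pvPairsI (pvFill temp a (b + 1) "") r

-- same, Nat indices and pvSetAll
def pvPairsN : List String → List Nat → List String
  | temp, [] => temp
  | temp, [a] => pvSetAll temp "^%" a temp.length
  | temp, a :: b :: r => pvPairsN (pvSetAll temp "" a (b + 1)) r

-- indices of marker lines
def pvMarkers : List String → List Nat
  | [] => []
  | x :: t => (if pvP x then [0] else []) ++ (pvMarkers t).map (· + 1)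

-- B's computation from an arbitrary starting state
def pvBRun (out : List String) (p : Int) (ls : List String) : List String :=
  let st := ls.foldl pvBStep (out, p)
  if st.2 == 0 then st.1 else st.1 ++ List.replicate st.2.toNat "^%"

theorem pvLength_setAll (temp : List String) (v : String) (a b : Nat) :
    (pvSetAll temp v a b).length = temp.length := by
  simp [pvSetAll]

theorem pvGetElem_setAll (temp : List String) (v : String) (a b i : Nat)
    (h : i < (pvSetAll temp v a b).length) :
    (pvSetAll temp v a b)[i] = if a ≤ i ∧ i < b then v else temp[i]'(by simpa [pvLength_setAll] using h) := by
  simp [pvSetAll]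

theorem pvFill_aux (v : String) : ∀ (n a : Nat) (temp : List String),
    (List.range n).foldl (fun t k => t.set (a + k) v) temp = pvSetAll temp v a (a + n) := by
  intro n
  induction n with
  | zero =>
    intro a temp
    simp only [List.range_zero, List.foldl_nil]
    apply List.ext_getElem (by simp [pvLength_setAll])
    intro i h1 h2
    rw [pvGetElem_setAll, if_neg (by omega)]
  | succ n ih =>
    intro a temp
    rw [List.range_succ, List.foldl_append, ih]
    simp only [List.foldl_cons, List.foldl_nil]
    apply List.ext_getElem (by simp [pvLength_setAll])
    intro i h1 h2
    rw [List.getElem_set]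
    by_cases hi : a + n = i
    · rw [if_pos hi, pvGetElem_setAll, if_pos (by omega)]
    · rw [if_neg hi, pvGetElem_setAll, pvGetElem_setAll]
      by_cases hc : a ≤ i ∧ i < a + n
      · rw [if_pos hc, if_pos (by omega)]
      · rw [if_neg hc, if_neg (by omega)]

theorem pvFill_eq (temp : List String) (v : String) (a b : Nat) :
    pvFill temp ((a : Int)) ((b : Int)) v = pvSetAll temp v a b := by
  unfold pvFill
  rw [PySem.List.pyRange_one, List.foldl_map]
  have hf : (fun (t : List String) (k : Nat) => t.set ((a : Int) + (k : Int)).toNat v)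
      = (fun t k => t.set (a + k) v) := by
    funext t k
    have h : ((a : Int) + (k : Int)).toNat = a + k := by omega
    rw [h]
  rw [hf, pvFill_aux]
  apply List.ext_getElem (by simp [pvLength_setAll])
  intro i h1 h2
  rw [pvGetElem_setAll, pvGetElem_setAll]
  have : (a ≤ i ∧ i < a + ((b : Int) - (a : Int)).toNat) ↔ (a ≤ i ∧ i < b) := by omega
  by_cases hc : a ≤ i ∧ i < b
  · rw [if_pos hc, if_pos (this.mpr hc)]
  · rw [if_neg hc, if_neg (fun h => hc (this.mp h))]

theorem pvSetAll_append (c t : List String) (v : String) (a b : Nat) :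
    pvSetAll (c ++ t) v (c.length + a) (c.length + b) = c ++ pvSetAll t v a b := by
  apply List.ext_getElem (by simp [pvLength_setAll])
  intro i h1 h2
  rw [pvGetElem_setAll]
  rcases Nat.lt_or_ge i c.length with hlt | hge
  · rw [List.getElem_append_left hlt, if_neg (by omega), List.getElem_append_left hlt]
  · have hstep : i < c.length + (pvSetAll t v a b).length := by
      simpa [pvLength_setAll] using h2
    rw [List.getElem_append_right hge, List.getElem_append_right (by simpa [pvLength_setAll] using hge)]
    rw [pvGetElem_setAll]
    by_cases hc : a ≤ i - c.length ∧ i - c.length < b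
    · rw [if_pos (by omega), if_pos hc]
    · rw [if_neg (by omega), if_neg hc]

theorem pvSetAll_prefix (u t : List String) (v : String) :
    pvSetAll (u ++ t) v 0 u.length = List.replicate u.length v ++ t := by
  apply List.ext_getElem (by simp [pvLength_setAll])
  intro i h1 h2
  rw [pvGetElem_setAll]
  rcases Nat.lt_or_ge i u.length with hlt | hge
  · rw [if_pos (by omega), List.getElem_append_left (by simpa using hlt),
      List.getElem_replicate]
  · rw [if_neg (by omega), List.getElem_append_right hge,
      List.getElem_append_right (by simpa using hge)]
    simp

theorem pvAWhile_eq_pairsI (idx : List Int) (temp : List String) (i : Nat) :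
    pvAWhile idx temp i = pvPairsI temp (idx.drop i) := by
  induction temp, i using pvAWhile.induct idx with
  | case1 temp i h ih =>
    rw [pvAWhile, dif_pos h]
    have hdrop : idx.drop i = idx[i] :: idx.drop (i + 1) := (List.getElem_cons_drop h).symm
    have hcast : ((i : Int) + 1) = ((i + 1 : Nat) : Int) := by push_cast; ring
    rcases Nat.lt_or_ge (i + 1) idx.length with h2 | h2
    · have hget : PySem.List.pyGet? idx ((i : Int) + 1) = some idx[i + 1] := by
        rw [hcast, PySem.List.pyGet?_natCast, List.getElem?_eq_getElem h2]
      have hdrop2 : idx.drop (i + 1) = idx[i + 1] :: idx.drop (i + 2) :=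
        (List.getElem_cons_drop h2).symm
      rw [ih, hget, hdrop, hdrop2, pvPairsI]
    · have hget : PySem.List.pyGet? idx ((i : Int) + 1) = none := by
        rw [hcast, PySem.List.pyGet?_natCast, List.getElem?_eq_none (by omega)]
      have hdrop2 : idx.drop (i + 1) = [] := List.drop_eq_nil_of_le (by omega)
      rw [ih, hget, hdrop, hdrop2]
      rw [List.drop_eq_nil_of_le (by omega : idx.length ≤ i + 2)]
      rfl
  | case2 temp i h =>
    rw [pvAWhile, dif_neg h, List.drop_eq_nil_of_le (by omega)]
    rfl

theorem pvPairsI_eq_pairsN (js : List Nat) (temp : List String) :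
    pvPairsI temp (js.map (fun j => (j : Int))) = pvPairsN temp js := by
  induction temp, js using pvPairsN.induct with
  | case1 temp => rfl
  | case2 temp a =>
    show pvPairsI temp [(a : Int)] = _
    rw [pvPairsI, pvPairsN, pvFill_eq]
  | case3 temp a b r ih =>
    show pvPairsI temp ((a : Int) :: (b : Int) :: r.map (fun j => (j : Int))) = _
    rw [pvPairsI, pvPairsN]
    have hc : ((b : Int) + 1) = (((b + 1 : Nat)) : Int) := by push_cast; ring
    rw [hc, pvFill_eq, ih]

theorem pvPairsN_shift (js : List Nat) (c t : List String) :
    pvPairsN (c ++ t) (js.map (fun j => j + c.length)) = c ++ pvPairsN t js := by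
  induction t, js using pvPairsN.induct with
  | case1 t => rfl
  | case2 t a =>
    show pvPairsN (c ++ t) [a + c.length] = _
    rw [pvPairsN, pvPairsN]
    have h1 : a + c.length = c.length + a := by omega
    have h2 : (c ++ t).length = c.length + t.length := by simp
    rw [h1, h2, pvSetAll_append]
  | case3 t a b r ih =>
    show pvPairsN (c ++ t) ((a + c.length) :: (b + c.length) :: r.map (fun j => j + c.length)) = _
    rw [pvPairsN, pvPairsN]
    have h1 : a + c.length = c.length + a := by omega
    have h2 : b + c.length + 1 = c.length + (b + 1) := by omega
    rw [h1, h2, pvSetAll_append, ih]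

theorem pvMarkers_nil_of_no_marker (ls : List String) (h : ∀ x ∈ ls, pvP x = false) :
    pvMarkers ls = [] := by
  induction ls with
  | nil => rfl
  | cons x t ih =>
    rw [pvMarkers, ih (fun y hy => h y (List.mem_cons_of_mem x hy)),
      if_neg (by simp [h x List.mem_cons_self])]
    rfl

theorem pvMarkers_append (pre xs : List String) (h : ∀ x ∈ pre, pvP x = false) :
    pvMarkers (pre ++ xs) = (pvMarkers xs).map (fun j => j + pre.length) := by
  induction pre with
  | nil => simp
  | cons x p ih =>
    rw [List.cons_append, pvMarkers, if_neg (by simp [h x List.mem_cons_self]),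
      ih (fun y hy => h y (List.mem_cons_of_mem x hy)), List.nil_append, List.map_map]
    apply List.map_congr_left
    intro j _
    simp
    omega

theorem pvMR (temp : List String) :
    List.filter (fun i => pvP (temp.getD i "")) (List.range temp.length) = pvMarkers temp := by
  induction temp with
  | nil => rfl
  | cons x t ih =>
    rw [List.length_cons, List.range_succ_eq_map, List.filter_cons, pvMarkers]
    have hmap : List.filter (fun i => pvP ((x :: t).getD i "")) (List.map Nat.succ (List.range t.length))
        = List.map Nat.succ (List.filter (fun i => pvP (t.getD i "")) (List.range t.length)) := by
      rw [List.filter_map]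
      congr 1
    rw [hmap, ih]
    by_cases hx : pvP x
    · simp [hx]
    · simp [hx]

theorem pvMarkersA (temp : List String) :
    (PySem.List.pyRange 0 (temp.length : Int) 1).foldl
      (fun acc i => if pvP (PySem.List.pyGetD temp i "") then acc ++ [i] else acc) []
    = (pvMarkers temp).map (fun j => (j : Int)) := by
  rw [PySem.List.foldl_append_if_eq_filter, List.nil_append, PySem.List.pyRange_zero_natCast,
    List.filter_map]
  have hfix : ((fun i => pvP (PySem.List.pyGetD temp i "")) ∘ (fun k : Nat => (k : Int)))
      = (fun i : Nat => pvP (temp.getD i "")) := by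
    funext i
    simp [PySem.List.pyGetD_natCast]
  rw [hfix, pvMR]
  induction pvMarkers temp with
  | nil => rfl
  | cons j r ih => simpa using ih

theorem pvB_no_marker_zero (pre : List String) (out : List String)
    (h : ∀ x ∈ pre, pvP x = false) :
    pre.foldl pvBStep (out, 0) = (out ++ pre, 0) := by
  induction pre generalizing out with
  | nil => simp
  | cons x p ih =>
    rw [List.foldl_cons]
    have hx : pvP x = false := h x List.mem_cons_self
    have hstep : pvBStep (out, 0) x = (out ++ [x], 0) := by
      simp [pvBStep, hx]
    rw [hstep, ih (out ++ [x]) (fun y hy => h y (List.mem_cons_of_mem x hy))]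
    simp

theorem pvB_no_marker_open (pre : List String) (out : List String) (p : Nat)
    (h : ∀ x ∈ pre, pvP x = false) :
    pre.foldl pvBStep (out, ((p + 1 : Nat) : Int)) = (out, ((p + 1 + pre.length : Nat) : Int)) := by
  induction pre generalizing p with
  | nil => simp
  | cons x pr ih =>
    rw [List.foldl_cons]
    have hx : pvP x = false := h x List.mem_cons_self
    have hstep : pvBStep (out, ((p + 1 : Nat) : Int)) x = (out, (((p + 1) + 1 : Nat) : Int)) := by
      simp only [pvBStep, hx, Bool.false_eq_true, if_false]
      rw [if_neg (by simp; omega)]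
      exact Prod.ext rfl (by push_cast; ring)
    rw [hstep, ih (p + 1) (fun y hy => h y (List.mem_cons_of_mem x hy))]
    congr 2
    simp only [List.length_cons]
    omega

theorem pvMarkers_cons_marker (m : String) (t : List String) (hm : pvP m = true) :
    pvMarkers (m :: t) = 0 :: (pvMarkers t).map (fun j => j + 1) := by
  rw [pvMarkers, if_pos hm]
  rfl

theorem pvBStep_marker_zero (out : List String) (m : String) (hm : pvP m = true) :
    pvBStep (out, 0) m = (out, 1) := by
  simp [pvBStep, hm]

theorem pvBStep_marker_open (out : List String) (m : String) (p : Nat) (hm : pvP m = true) :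
    pvBStep (out, ((p + 1 : Nat) : Int)) m = (out ++ List.replicate (p + 2) "", 0) := by
  simp only [pvBStep, hm, if_true]
  rw [if_neg (by simp; omega)]
  have h2 : (((p + 1 : Nat) : Int) + 1).toNat = p + 2 := by omega
  rw [h2]

theorem pvMain : ∀ (n : Nat) (ls out : List String), ls.length ≤ n →
    pvBRun out 0 ls = out ++ pvPairsN ls (pvMarkers ls) := by
  intro n
  induction n with
  | zero =>
    intro ls out hlen
    have : ls = [] := List.eq_nil_of_length_eq_zero (by omega)
    subst this
    simp [pvBRun, pvPairsN, pvMarkers]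
  | succ n ih =>
    intro ls out hlen
    have hls : ls.takeWhile (fun l => !pvP l) ++ ls.dropWhile (fun l => !pvP l) = ls :=
      List.takeWhile_append_dropWhile
    have hq : ∀ x ∈ ls.takeWhile (fun l => !pvP l), pvP x = false := by
      intro x hx
      simpa using List.mem_takeWhile_imp hx
    rcases hrest : ls.dropWhile (fun l => !pvP l) with _ | ⟨m, rest'⟩
    · -- no marker line at all
      rw [hrest, List.append_nil] at hls
      have hnomark0 : ∀ x ∈ ls, pvP x = false := by
        intro x hx
        exact hq x (by rw [hls]; exact hx)
      rw [pvMarkers_nil_of_no_marker ls hnomark0]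
      unfold pvBRun
      rw [pvB_no_marker_zero ls out hnomark0]
      simp [pvPairsN]
    · -- ls = pre ++ m :: rest', pvP m
      have hne : ls.dropWhile (fun l => !pvP l) ≠ [] := by rw [hrest]; simp
      have hm : pvP m = true := by
        have h0 := List.head_dropWhile_not (fun l => !pvP l) hne
        simp only [hrest, List.head_cons] at h0
        simpa using h0
      rw [hrest] at hls
      clear hrest hne
      generalize hgen : List.takeWhile (fun l => !pvP l) ls = pre at hls hq
      subst hls
      have hq2 : ∀ x ∈ rest'.takeWhile (fun l => !pvP l), pvP x = false := by
        intro x hx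
        simpa using List.mem_takeWhile_imp hx
      have hls2 : rest'.takeWhile (fun l => !pvP l) ++ rest'.dropWhile (fun l => !pvP l) = rest' :=
        List.takeWhile_append_dropWhile
      rcases hrest2 : rest'.dropWhile (fun l => !pvP l) with _ | ⟨m2, rest2⟩
      · -- unclosed block: rest' has no further marker
        rw [hrest2, List.append_nil] at hls2
        have hnomark : ∀ x ∈ rest', pvP x = false := by
          intro x hx
          exact hq2 x (by rw [hls2]; exact hx)
        have hmk : pvMarkers (pre ++ m :: rest') = [pre.length] := by
          rw [pvMarkers_append _ _ hq, pvMarkers_cons_marker _ _ hm,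
            pvMarkers_nil_of_no_marker _ hnomark]
          simp
        rw [hmk]
        have hA : pvPairsN (pre ++ m :: rest') [pre.length]
            = pre ++ List.replicate (rest'.length + 1) "^%" := by
          rw [pvPairsN]
          have h2 : (pre ++ m :: rest').length = pre.length + (m :: rest').length := by simp
          rw [h2]
          have h3 := pvSetAll_append pre (m :: rest') "^%" 0 (m :: rest').length
          rw [Nat.add_zero] at h3
          rw [h3]
          congr 1
          have h4 := pvSetAll_prefix (m :: rest') [] "^%"
          simpa using h4
        rw [hA]
        unfold pvBRun
        rw [List.foldl_append, pvB_no_marker_zero _ out hq, List.foldl_cons,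
          pvBStep_marker_zero _ _ hm]
        have h5 : (1 : Int) = ((0 + 1 : Nat) : Int) := by norm_num
        rw [h5, pvB_no_marker_open rest' _ 0 hnomark]
        simp only []
        rw [if_neg (by simp; omega)]
        have h6 : (((0 + 1 + rest'.length : Nat) : Int)).toNat = rest'.length + 1 := by omega
        rw [h6]
        simp
      · -- a closed block: ls = pre ++ m :: (mid ++ m2 :: rest2)
        have hne2 : rest'.dropWhile (fun l => !pvP l) ≠ [] := by rw [hrest2]; simp
        have hm2 : pvP m2 = true := by
          have h0 := List.head_dropWhile_not (fun l => !pvP l) hne2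
          simp only [hrest2, List.head_cons] at h0
          simpa using h0
        rw [hrest2] at hls2
        clear hrest2 hne2
        generalize hgen2 : List.takeWhile (fun l => !pvP l) rest' = mid at hls2 hq2
        subst hls2
        have hlsum : (pre ++ m :: (mid ++ m2 :: rest2)).length
            = pre.length + mid.length + 2 + rest2.length := by simp; omega
        have hmk : pvMarkers (pre ++ m :: (mid ++ m2 :: rest2)) = pre.length
            :: (mid.length + 1 + pre.length)
            :: (pvMarkers rest2).map (fun j => j + (pre.length + mid.length + 2)) := by
          rw [pvMarkers_append _ _ hq, pvMarkers_cons_marker _ _ hm,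
            pvMarkers_append _ _ hq2, pvMarkers_cons_marker _ _ hm2]
          simp only [List.map_cons, List.map_map]
          have hfun : ((fun j => j + pre.length) ∘ (fun j => j + 1) ∘ (fun j => j + mid.length) ∘ fun j => j + 1)
              = (fun j : Nat => j + (pre.length + mid.length + 2)) := by
            funext j
            simp [Function.comp]
            omega
          rw [hfun]
          simp only [Nat.zero_add]
        rw [hmk]
        have hsplit3 : pre ++ m :: (mid ++ m2 :: rest2)
            = pre ++ ((m :: mid) ++ [m2]) ++ rest2 := by simp
        have hA : pvPairsN (pre ++ m :: (mid ++ m2 :: rest2)) (pre.length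
            :: (mid.length + 1 + pre.length)
            :: (pvMarkers rest2).map (fun j => j + (pre.length + mid.length + 2)))
            = (pre ++ List.replicate (mid.length + 2) "")
              ++ pvPairsN rest2 (pvMarkers rest2) := by
          rw [pvPairsN]
          have hfill : pvSetAll (pre ++ m :: (mid ++ m2 :: rest2)) ""
              pre.length (mid.length + 1 + pre.length + 1)
              = (pre ++ List.replicate (mid.length + 2) "") ++ rest2 := by
            have hb : mid.length + 1 + pre.length + 1
                = pre.length + (mid.length + 2) := by omega
            have hlist : pre ++ m :: (mid ++ m2 :: rest2)
                = pre ++ (((m :: mid) ++ [m2]) ++ rest2) := by simp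
            rw [hlist, hb]
            have h3 := pvSetAll_append pre (((m :: mid) ++ [m2]) ++ rest2) "" 0 (mid.length + 2)
            rw [Nat.add_zero] at h3
            rw [h3]
            have hu : mid.length + 2 = ((m :: mid) ++ [m2]).length := by simp
            rw [hu, pvSetAll_prefix]
            simp
          rw [hfill]
          have hc : pre.length + mid.length + 2
              = (pre ++ List.replicate (mid.length + 2) "").length := by simp; omega
          rw [hc, pvPairsN_shift]
        rw [hA]
        unfold pvBRun
        rw [hsplit3]
        simp only [List.foldl_append, List.foldl_cons]
        rw [pvB_no_marker_zero _ out hq, pvBStep_marker_zero _ _ hm]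
        have h5 : (1 : Int) = ((0 + 1 : Nat) : Int) := by norm_num
        rw [h5, pvB_no_marker_open _ _ 0 hq2]
        simp only [List.foldl_nil]
        rw [show (0 + 1 + mid.length) = mid.length + 1 from by omega]
        rw [pvBStep_marker_open _ _ _ hm2]
        have hihh := ih rest2 ((out ++ pre)
            ++ List.replicate (mid.length + 2) "") (by
          have := hlen
          rw [hlsum] at this
          omega)
        unfold pvBRun at hihh
        rw [hihh]
        simp [List.append_assoc]

-- ===== VERDICT (by name: the statement is the Claim_ definition above) =====
theorem removecomment_spec : Claim_equal_removecomment := by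
  intro sentence _
  unfold Spec_removecomment removecomment removecomment_alt
  simp only []
  congr 1
  rw [pvMarkersA, pvAWhile_eq_pairsI, List.drop_zero, pvPairsI_eq_pairsN]
  have h := pvMain ((PySem.Str.split? sentence "\n").getD []).length
    ((PySem.Str.split? sentence "\n").getD []) [] le_rfl
  unfold pvBRun at h
  rw [List.nil_append] at h
  exact h.symm
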